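-- pv_equiv track=rewrite | github.com/alaiasolkobreslin/CTSketch | tt_sketch/utils.py | trim_ranks
-- ===== SOURCE A (Python) =====
-- from functools import reduce
-- from operator import mul
-- from typing import Generator, List, Optional, Sequence, Tuple, Union
--
-- def trim_ranks(
--     dims: Tuple[int, ...], ranks: Tuple[int, ...]
-- ) -> Tuple[int, ...]:
--     """Return TT-rank to which TT can be exactly reduced
--
--     A tt-rank can never be more than the product of the dimensions on the left
--     or right of the rank. Furthermore, any internal edge in the TT cannot have
--     rank higher than the product of any two connected supercores. Ranks are
--     iteratively reduced  for each edge to satisfy these two requirements until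
--     the requirements are all satisfied.
--     """
--     ranks_trimmed = list(ranks)
--
--     for i, r in enumerate(ranks_trimmed):
--         dim_left = reduce(mul, dims[: i + 1], 1)
--         dim_right = reduce(mul, dims[i + 1 :], 1)
--         ranks_trimmed[i] = min(r, dim_left, dim_right)
--     changed = True
--     ranks_trimmed = [1] + ranks_trimmed + [1]
--     for _ in range(100):
--         changed = False
--         for i, d in enumerate(dims):
--             if ranks_trimmed[i + 1] > ranks_trimmed[i] * d:
--                 changed = True
--                 ranks_trimmed[i + 1] = ranks_trimmed[i] * d
--             if ranks_trimmed[i] > d * ranks_trimmed[i + 1]: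
--                 changed = True
--                 ranks_trimmed[i] = d * ranks_trimmed[i + 1]
--         if not changed:
--             break
--
--     return tuple(ranks_trimmed[1:-1])
-- ===== SOURCE B (Python) =====
-- def trim_ranks(dims, ranks):
--     """Return TT-rank to which TT can be exactly reduced.
--
--     Same contract as the original, but the left/right dimension products are
--     read from prefix/suffix product tables built in one pass, and each
--     relaxation sweep rebuilds the rank list pairwise instead of indexing."""
--     n = len(dims)
--     pref = [1] * (n + 1)
--     for j in range(n):
--         pref[j + 1] = pref[j] * dims[j]
--     suf = [1] * (n + 1)
--     for j in range(n - 1, -1, -1):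
--         suf[j] = dims[j] * suf[j + 1]
--     rt = [1] + [min(r, pref[min(i + 1, n)], suf[min(i + 1, n)])
--                 for i, r in enumerate(ranks)] + [1]
--     for _ in range(100):
--         rt, changed = _sweep(dims, rt)
--         if not changed:
--             break
--     return tuple(rt[1:-1])
--
--
-- def _sweep(dims, rt):
--     out = []
--     changed = False
--     left = rt[0]
--     for d, r in zip(dims, rt[1:]):
--         if r > left * d:
--             r = left * d
--             changed = True
--         if left > d * r:
--             left = d * r
--             changed = True
--         out.append(left)
--         left = r
--     out.append(left)
--     out.extend(rt[len(out):])
--     return out, changed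
-- ===== Notes on version B (the rewrite author's own statement) =====
-- stated objective: faster
-- what changed: Phase 1 reads left/right dimension products from prefix/suffix product tables built in one pass instead of re-running reduce over slices per rank, and each relaxation sweep rebuilds the padded rank list pairwise (carrying the left neighbour) instead of in-place index updates.
import Mathlib
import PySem

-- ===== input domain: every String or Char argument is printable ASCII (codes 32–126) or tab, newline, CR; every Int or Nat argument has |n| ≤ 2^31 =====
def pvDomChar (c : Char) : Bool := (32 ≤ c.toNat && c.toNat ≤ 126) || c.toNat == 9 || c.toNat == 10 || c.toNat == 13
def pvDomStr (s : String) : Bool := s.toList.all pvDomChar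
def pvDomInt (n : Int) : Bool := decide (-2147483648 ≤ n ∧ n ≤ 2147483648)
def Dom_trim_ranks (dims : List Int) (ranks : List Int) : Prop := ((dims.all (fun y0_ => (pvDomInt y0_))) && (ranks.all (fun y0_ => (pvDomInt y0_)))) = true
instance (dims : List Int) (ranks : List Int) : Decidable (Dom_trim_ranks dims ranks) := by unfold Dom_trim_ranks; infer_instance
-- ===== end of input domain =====

-- B replaces A's per-rank reduce-over-slices by one-pass prefix/suffix product tables and
-- rebuilds each relaxation sweep pairwise instead of by in-place indexing (objective: faster).


-- ===== PORT A =====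
-- one body iteration of `for i, d in enumerate(dims)` (two clamped in-place updates)
def pvStepA (s : List Int × Bool) (p : Int × Int) : List Int × Bool :=
  let rt := s.1
  let i := p.1
  let d := p.2
  let s1 : List Int × Bool :=
    if PySem.List.pyGetD rt (i+1) 0 > PySem.List.pyGetD rt i 0 * d then
      (PySem.List.pySetD rt (i+1) (PySem.List.pyGetD rt i 0 * d), true)
    else s
  if PySem.List.pyGetD s1.1 i 0 > d * PySem.List.pyGetD s1.1 (i+1) 0 then
    (PySem.List.pySetD s1.1 i (d * PySem.List.pyGetD s1.1 (i+1) 0), true)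
  else s1

-- `for _ in range(100): … if not changed: break`
def pvLoopA (dims : List Int) : Nat → List Int → List Int
  | 0, rt => rt
  | n+1, rt =>
    let res := (PySem.List.enumerate dims 0).foldl pvStepA (rt, false)
    if res.2 then pvLoopA dims n res.1 else res.1

def trim_ranks (dims : List Int) (ranks : List Int) : List Int :=
  -- each slot of ranks_trimmed is overwritten once from its original value: a map over enumerate
  let ranks_trimmed := (PySem.List.enumerate ranks 0).map (fun p =>
    let dim_left := (PySem.List.slice dims none (some (p.1 + 1))).foldl (· * ·) 1
    let dim_right := (PySem.List.slice dims (some (p.1 + 1)) none).foldl (· * ·) 1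
    min (min p.2 dim_left) dim_right)
  let padded := [1] ++ ranks_trimmed ++ [1]
  let final := pvLoopA dims 100 padded
  PySem.List.slice final (some 1) (some (-1))

-- ===== PORT B =====
-- pref[0]=1, pref[j+1]=pref[j]*dims[j]
def pvPref (acc : Int) : List Int → List Int
  | [] => [acc]
  | d :: ds => acc :: pvPref (acc * d) ds

-- suf[n]=1, suf[j]=dims[j]*suf[j+1]
def pvSuf : List Int → List Int
  | [] => [1]
  | d :: ds => (d * (pvSuf ds).headD 1) :: pvSuf ds

-- one pairwise sweep: rebuilds the list carrying the current left neighbour; zip truncation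
def pvSweep (left : Int) : List Int → List Int → List Int × Bool
  | d :: ds, r :: rs =>
    let c1 := r > left * d
    let r1 := if c1 then left * d else r
    let c2 := left > d * r1
    let left1 := if c2 then d * r1 else left
    let res := pvSweep r1 ds rs
    (left1 :: res.1, c1 || c2 || res.2)
  | _, rest => (left :: rest, false)

def pvLoopB (dims : List Int) : Nat → List Int → List Int
  | 0, rt => rt
  | n+1, rt =>
    let res := pvSweep (rt.headD 0) dims (rt.drop 1)
    if res.2 then pvLoopB dims n res.1 else res.1

def trim_ranks_alt (dims : List Int) (ranks : List Int) : List Int :=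
  let n : Int := PySem.List.len dims
  let pref := pvPref 1 dims
  let suf := pvSuf dims
  let rt := [1] ++ (PySem.List.enumerate ranks 0).map (fun p =>
    min (min p.2 (PySem.List.pyGetD pref (min (p.1 + 1) n) 0))
        (PySem.List.pyGetD suf (min (p.1 + 1) n) 0)) ++ [1]
  let final := pvLoopB dims 100 rt
  PySem.List.slice final (some 1) (some (-1))

-- ===== PRECONDITION & SPEC =====
-- A raises IndexError in its relaxation loop as soon as i+1 indexes past the padded list,
-- i.e. exactly when len(dims) > len(ranks) + 1; Pre_ excludes exactly those inputs.
def Pre_trim_ranks (dims : List Int) (ranks : List Int) : Prop :=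
  dims.length ≤ ranks.length + 1
instance (dims : List Int) (ranks : List Int) : Decidable (Pre_trim_ranks dims ranks) := by
  unfold Pre_trim_ranks; infer_instance

def pvWitness_trim_ranks : List Int × List Int := ([2, 3, 4], [5, 7])

def Spec_trim_ranks (dims : List Int) (ranks : List Int) (out : List Int) : Prop := out = trim_ranks_alt dims ranks
instance (dims : List Int) (ranks : List Int) (out : List Int) : Decidable (Spec_trim_ranks dims ranks out) := by unfold Spec_trim_ranks; infer_instance

-- ===== CLAIM (what is proved, stated in full; the proofs are below) =====
def Claim_equal_trim_ranks : Prop := ∀ (dims : List Int) (ranks : List Int), Dom_trim_ranks dims ranks → Pre_trim_ranks dims ranks → Spec_trim_ranks dims ranks (trim_ranks dims ranks)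

-- ===== LEMMAS AND PROOFS =====

-- getD/set facts at the split point pre ++ x :: t
theorem pvGetD_split {pre t : List Int} (x : Int) :
    (pre ++ x :: t).getD pre.length 0 = x := by
  induction pre with
  | nil => rfl
  | cons a l ih => simp

theorem pvGetD_split1 {pre t : List Int} (x y : Int) :
    (pre ++ x :: y :: t).getD (pre.length + 1) 0 = y := by
  induction pre with
  | nil => rfl
  | cons a l ih => simp

theorem pvSet_split {pre t : List Int} (x v : Int) :
    (pre ++ x :: t).set pre.length v = pre ++ v :: t := by
  induction pre with
  | nil => rfl
  | cons a l ih => simp [ih]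

theorem pvSet_split1 {pre t : List Int} (x y v : Int) :
    (pre ++ x :: y :: t).set (pre.length + 1) v = pre ++ x :: v :: t := by
  induction pre with
  | nil => rfl
  | cons a l ih => simp [ih]

-- foldl of multiplication factors out its seed
theorem pvFoldl_mul (d : Int) (l : List Int) : l.foldl (· * ·) d = d * l.foldl (· * ·) 1 := by
  induction l generalizing d with
  | nil => simp
  | cons a t ih =>
    simp only [List.foldl_cons]
    rw [ih (d * a), ih (1 * a)]
    ring

-- prefix products: pvPref acc dims !getD j = acc * prod (take j dims) for j ≤ n
theorem pvPref_getD (dims : List Int) : ∀ (acc : Int) (j : Nat), j ≤ dims.length →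
    (pvPref acc dims).getD j 0 = acc * ((dims.take j).foldl (· * ·) 1) := by
  induction dims with
  | nil =>
    intro acc j hj
    simp only [List.length_nil, Nat.le_zero] at hj
    subst hj
    simp [pvPref]
  | cons d ds ih =>
    intro acc j hj
    cases j with
    | zero => simp [pvPref]
    | succ k =>
      have hk : k ≤ ds.length := by simpa using hj
      simp only [pvPref, List.getD_cons_succ, ih (acc * d) k hk, List.take_succ_cons,
        List.foldl_cons, one_mul]
      rw [pvFoldl_mul d (ds.take k)]
      ring

-- suffix products: pvSuf dims !getD j = prod (drop j dims) for j ≤ n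
theorem pvSuf_length (dims : List Int) : (pvSuf dims).length = dims.length + 1 := by
  induction dims with
  | nil => rfl
  | cons d ds ih => simp [pvSuf, ih]

theorem pvSuf_getD (dims : List Int) : ∀ (j : Nat), j ≤ dims.length →
    (pvSuf dims).getD j 0 = (dims.drop j).foldl (· * ·) 1 := by
  induction dims with
  | nil =>
    intro j hj
    simp only [List.length_nil, Nat.le_zero] at hj
    subst hj
    simp [pvSuf]
  | cons d ds ih =>
    intro j hj
    cases j with
    | zero =>
      have h0 := ih 0 (Nat.zero_le _)
      cases hsuf : pvSuf ds with
      | nil =>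
        have := pvSuf_length ds
        rw [hsuf] at this
        simp at this
      | cons s0 t =>
        rw [hsuf] at h0
        simp only [List.getD_cons_zero, List.drop_zero] at h0
        simp only [pvSuf, hsuf, List.getD_cons_zero, List.headD_cons, h0, List.drop_zero,
          List.foldl_cons]
        rw [pvFoldl_mul (1 * d) ds]
        ring
    | succ k =>
      have hk : k ≤ ds.length := by simpa using hj
      simpa [pvSuf] using ih k hk

-- one A-pass over enumerate (offset = pre.length) equals the pairwise sweep on the suffix
theorem pvSweep_length (dims : List Int) : ∀ (left : Int) (rest : List Int),
    (pvSweep left dims rest).1.length = rest.length + 1 := by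
  induction dims with
  | nil => intro left rest; simp [pvSweep]
  | cons d ds ih =>
    intro left rest
    cases rest with
    | nil => simp [pvSweep]
    | cons r rs => simp [pvSweep, ih]

theorem pvPass_eq (dims : List Int) : ∀ (pre : List Int) (left : Int) (rest : List Int) (c : Bool),
    dims.length ≤ rest.length →
    (PySem.List.enumerate dims (pre.length : Int)).foldl pvStepA (pre ++ left :: rest, c) =
      (pre ++ (pvSweep left dims rest).1, c || (pvSweep left dims rest).2) := by
  induction dims with
  | nil =>
    intro pre left rest c _
    simp [PySem.List.enumerate_nil, pvSweep]
  | cons d ds ih =>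
    intro pre left rest c hlen
    cases rest with
    | nil => simp at hlen
    | cons r rs =>
      have hlen' : ds.length ≤ rs.length := by simpa using hlen
      rw [PySem.List.enumerate_cons, List.foldl_cons]
      -- evaluate one pvStepA at absolute index pre.length
      have hstep : pvStepA (pre ++ left :: r :: rs, c) ((pre.length : Int), d) =
          (pre ++ (if left > d * (if r > left * d then left * d else r)
                     then d * (if r > left * d then left * d else r) else left) ::
                 (if r > left * d then left * d else r) :: rs,
           if left > d * (if r > left * d then left * d else r) then true
           else (if r > left * d then true else c)) := by
        simp only [pvStepA, PySem.List.pyGetD_natCast]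
        have e0 : ((pre.length : Int) + 1) = ((pre.length + 1 : Nat) : Int) := by push_cast; ring
        rw [e0]
        simp only [PySem.List.pyGetD_natCast, PySem.List.pySetD_natCast]
        rw [pvGetD_split, pvGetD_split1]
        by_cases h1 : r > left * d
        · simp only [if_pos h1]
          rw [pvSet_split1]
          simp only [pvGetD_split, pvGetD_split1]
          by_cases h2 : left > d * (left * d)
          · simp only [if_pos h2]
            rw [pvSet_split]
          · simp only [if_neg h2]
        · simp only [if_neg h1]
          simp only [pvGetD_split, pvGetD_split1]
          by_cases h2 : left > d * r
          · simp only [if_pos h2]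
            rw [pvSet_split]
          · simp only [if_neg h2]
      rw [hstep]
      -- apply IH with pre' = pre ++ [left1]
      set r1 := if r > left * d then left * d else r with hr1
      set left1 := if left > d * r1 then d * r1 else left with hl1
      set c' := if left > d * r1 then true else (if r > left * d then true else c) with hc'
      have hpre : pre ++ left1 :: r1 :: rs = (pre ++ [left1]) ++ r1 :: rs := by simp
      have hlen1 : ((pre ++ [left1]).length : Int) = (pre.length : Int) + 1 := by
        simp
      rw [hpre, ← hlen1]
      rw [ih (pre ++ [left1]) r1 rs c' hlen']
      -- fold pvSweep on the cons case
      show ((pre ++ [left1]) ++ (pvSweep r1 ds rs).1, c' || (pvSweep r1 ds rs).2) = _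
      have hsw : pvSweep left (d :: ds) (r :: rs) =
          (left1 :: (pvSweep r1 ds rs).1,
           (decide (r > left * d) || decide (left > d * r1)) || (pvSweep r1 ds rs).2) := by
        simp only [pvSweep, ← hr1, ← hl1]
      rw [hsw]
      refine Prod.ext (by simp) ?_
      simp only [hc']
      by_cases h1 : r > left * d <;> by_cases h2 : left > d * r1 <;> simp [h1, h2]

-- the two relaxation loops agree (rest at least as long as dims, nonempty head)
theorem pvLoop_eq (dims : List Int) : ∀ (fuel : Nat) (left : Int) (rest : List Int),
    dims.length ≤ rest.length →
    pvLoopA dims fuel (left :: rest) = pvLoopB dims fuel (left :: rest) := by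
  intro fuel
  induction fuel with
  | zero => intro left rest _; rfl
  | succ n ih =>
    intro left rest hlen
    have hpass := pvPass_eq dims [] left rest false hlen
    simp only [List.nil_append, List.length_nil, Nat.cast_zero] at hpass
    simp only [pvLoopA, pvLoopB, hpass, List.headD_cons, List.drop_one, List.tail_cons]
    simp only [Bool.false_or]
    by_cases hch : (pvSweep left dims rest).2
    · simp only [hch, if_true]
      -- result list of the sweep is nonempty with tail long enough
      have hlen2 : (pvSweep left dims rest).1.length = rest.length + 1 := pvSweep_length dims left rest
      cases hsw : (pvSweep left dims rest).1 with
      | nil => rw [hsw] at hlen2; simp at hlen2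
      | cons l2 rest2 =>
        rw [hsw] at hlen2
        simp only [List.length_cons, Nat.add_right_cancel_iff] at hlen2
        exact ih l2 rest2 (by omega)
    · simp [hch]

-- phase-1 entries agree: slice products = table lookups
theorem pvPhase1_entry (dims : List Int) (k : Nat) (r : Int) :
    (min (min r ((PySem.List.slice dims none (some ((k : Int) + 1))).foldl (· * ·) 1))
         ((PySem.List.slice dims (some ((k : Int) + 1)) none).foldl (· * ·) 1)) =
    (min (min r (PySem.List.pyGetD (pvPref 1 dims) (min ((k : Int) + 1) (PySem.List.len dims)) 0))
         (PySem.List.pyGetD (pvSuf dims) (min ((k : Int) + 1) (PySem.List.len dims)) 0)) := by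
  have e1 : ((k : Int) + 1) = ((k + 1 : Nat) : Int) := by push_cast; ring
  have e2 : min ((k : Int) + 1) (PySem.List.len dims) = ((min (k + 1) dims.length : Nat) : Int) := by
    rw [e1, PySem.List.len_eq]
    exact_mod_cast (Nat.cast_min (m := k + 1) (n := dims.length)).symm
  rw [e2, e1, PySem.List.slice_to_natCast, PySem.List.slice_from_natCast,
      PySem.List.pyGetD_natCast, PySem.List.pyGetD_natCast]
  rw [pvPref_getD dims 1 (min (k + 1) dims.length) (Nat.min_le_right _ _),
      pvSuf_getD dims (min (k + 1) dims.length) (Nat.min_le_right _ _)]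
  rw [one_mul]
  by_cases h : k + 1 ≤ dims.length
  · rw [Nat.min_eq_left h]
  · have h1 : min (k + 1) dims.length = dims.length := Nat.min_eq_right (by omega)
    rw [h1, List.take_of_length_le (by omega), List.take_of_length_le (le_refl _),
        List.drop_of_length_le (by omega), List.drop_of_length_le (le_refl _)]

-- ===== VERDICT (by name: the statement is the Claim_ definition above) =====
theorem trim_ranks_spec : Claim_equal_trim_ranks := by
  intro dims ranks _ hpre
  simp only [Spec_trim_ranks, trim_ranks, trim_ranks_alt]
  -- the phase-1 lists coincide
  have hmap : (PySem.List.enumerate ranks 0).map (fun p =>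
      let dim_left := (PySem.List.slice dims none (some (p.1 + 1))).foldl (· * ·) 1
      let dim_right := (PySem.List.slice dims (some (p.1 + 1)) none).foldl (· * ·) 1
      min (min p.2 dim_left) dim_right) =
    (PySem.List.enumerate ranks 0).map (fun p =>
      min (min p.2 (PySem.List.pyGetD (pvPref 1 dims) (min (p.1 + 1) (PySem.List.len dims)) 0))
          (PySem.List.pyGetD (pvSuf dims) (min (p.1 + 1) (PySem.List.len dims)) 0)) := by
    apply List.map_congr_left
    intro p hp
    rcases (PySem.List.mem_enumerate_iff _ _ _).1 hp with ⟨k, hk, rfl⟩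
    simpa using pvPhase1_entry dims k ranks[k]
  rw [hmap]
  -- the relaxation loops coincide
  set mid := (PySem.List.enumerate ranks 0).map (fun p =>
      min (min p.2 (PySem.List.pyGetD (pvPref 1 dims) (min (p.1 + 1) (PySem.List.len dims)) 0))
          (PySem.List.pyGetD (pvSuf dims) (min (p.1 + 1) (PySem.List.len dims)) 0)) with hmid
  have hlenmid : mid.length = ranks.length := by
    rw [hmid, List.length_map, PySem.List.length_enumerate]
  have hrest : dims.length ≤ (mid ++ [1]).length := by
    simp [hlenmid]
    exact hpre
  have : ([1] ++ mid ++ [1] : List Int) = (1 : Int) :: (mid ++ [1]) := by simp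
  rw [this, pvLoop_eq dims 100 1 (mid ++ [1]) hrest]
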